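-- pv_equiv track=rewrite | github.com/MrHamdulay/csc3-capstone | examples/data/Assignment_7/frnpau013/util.py | check_won_1d
-- ===== SOURCE A (Python) =====
-- def check_won_1d(grid):
--     """return True if a value>=32 is found in a 1d grid; otherwise False"""
--     if grid ==[]:
--         return False
--     else:
--         if grid[0] >= 32:
--             return True
--         else:
--             x = check_won_1d(grid[1:])
--             return x
-- ===== SOURCE B (Python) =====
-- def check_won_1d(grid):
--     """return True if a value>=32 is found in a 1d grid; otherwise False"""
--     for v in grid:
--         if v >= 32:
--             return True
--     return False
-- ===== Notes on version B (the rewrite author's own statement) =====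
-- stated objective: simpler
-- what changed: Replaces A's head/tail recursion with grid[1:] slicing by a plain iterative scan with early return, removing the O(n^2) slice copying.
import Mathlib
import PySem

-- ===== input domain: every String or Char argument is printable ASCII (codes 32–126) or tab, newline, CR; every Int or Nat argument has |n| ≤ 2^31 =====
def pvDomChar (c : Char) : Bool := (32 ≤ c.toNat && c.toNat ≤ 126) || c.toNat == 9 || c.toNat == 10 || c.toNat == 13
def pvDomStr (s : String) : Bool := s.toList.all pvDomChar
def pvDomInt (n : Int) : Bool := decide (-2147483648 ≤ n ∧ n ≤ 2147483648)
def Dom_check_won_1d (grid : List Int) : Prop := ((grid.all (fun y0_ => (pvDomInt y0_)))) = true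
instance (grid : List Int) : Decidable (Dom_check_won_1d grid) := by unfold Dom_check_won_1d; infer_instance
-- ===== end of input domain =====

-- B replaces A's head/tail recursion over grid[1:] by a single iterative scan with early return (simpler, no slice copies).

-- ===== PORT A =====
-- A: if grid == []: return False; elif grid[0] >= 32: return True; else: return check_won_1d(grid[1:])
def check_won_1d (grid : List Int) : Bool :=
  if grid = [] then
    false
  else
    if (PySem.List.pyGet? grid 0).getD 0 ≥ 32 then
      true
    else
      let x := check_won_1d (PySem.List.slice grid (some 1) none)
      x
termination_by grid.length
decreasing_by
  rw [PySem.List.slice_from_one]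
  cases grid with
  | nil => simp_all
  | cons a t => simp

-- ===== PORT B =====
-- B: for v in grid: if v >= 32: return True; return False  (loop ported as a fold over the remaining list with an early-out flag)
def check_won_1d_alt (grid : List Int) : Bool :=
  grid.foldl (fun found v => found || decide (v ≥ 32)) false

-- ===== PRECONDITION & SPEC =====
def Spec_check_won_1d (grid : List Int) (out : Bool) : Prop := out = check_won_1d_alt grid
instance (grid : List Int) (out : Bool) : Decidable (Spec_check_won_1d grid out) := by unfold Spec_check_won_1d; infer_instance

-- ===== CLAIM (what is proved, stated in full; the proofs are below) =====
def Claim_equal_check_won_1d : Prop := ∀ (grid : List Int), Dom_check_won_1d grid → Spec_check_won_1d grid (check_won_1d grid)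

-- ===== LEMMAS AND PROOFS =====
theorem alt_cons (v : Int) (t : List Int) :
    check_won_1d_alt (v :: t) = (if v ≥ 32 then true else check_won_1d_alt t) := by
  unfold check_won_1d_alt
  by_cases h : v ≥ 32
  · simp [h, List.foldl]
    induction t with
    | nil => simp
    | cons a s ih => simp [List.foldl] at ih ⊢; exact ih
  · simp [h, List.foldl]

theorem eq_all (grid : List Int) : check_won_1d grid = check_won_1d_alt grid := by
  induction grid with
  | nil => simp [check_won_1d, check_won_1d_alt]
  | cons a t ih =>
    rw [check_won_1d, alt_cons]
    simp [PySem.List.pyGet?, PySem.List.slice]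
    by_cases h : a ≥ 32
    · simp [h, PySem.List.pyIdx?]
    · simp [h, PySem.List.pyIdx?]
      simpa [PySem.List.slice] using ih

-- ===== VERDICT (by name: the statement is the Claim_ definition above) =====
theorem check_won_1d_spec : Claim_equal_check_won_1d := by
  intro grid _
  unfold Spec_check_won_1d
  exact eq_all grid
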